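-- pv_equiv track=rewrite | github.com/DancingOnAir/LeetcodePythonSolution | String/2222_number_of_ways_to_select_buildings.py | numberOfWays1
-- ===== SOURCE A (Python) =====
-- def numberOfWays1(s: str) -> int:
--     n = len(s)
--     zeros = s.count('0')
--     ones = s.count('1')
--
--     left, right = [0] * n, [0] * n
--     left_zero, left_one = 0, 0
--     for i, c in enumerate(s):
--         if c == '0':
--             left[i] = left_one
--             right[i] = ones - left_one
--             left_zero += 1
--         else:
--             left[i] = left_zero
--             right[i] = zeros - left_zero
--             left_one += 1
--
--     res = 0
--     for i in range(n):
--         res += left[i] * right[i]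
--     return res
-- ===== SOURCE B (Python) =====
-- def numberOfWays1(s: str) -> int:
--     # one pass, O(1) space: each '0' contributes x*(ones-x) and each other char
--     # z*(zeros-z), where x/z are running prefix counts; summed via the expansion
--     # ones*sx - qx + zeros*sz - qz with sx,sz (sums) and qx,qz (sums of squares)
--     ones = s.count('1')
--     zeros = s.count('0')
--     x = z = sx = sz = qx = qz = 0
--     for c in s:
--         if c == '0':
--             sx += x
--             qx += x * x
--             z += 1
--         else:
--             sz += z
--             qz += z * z
--             x += 1
--     return ones * sx - qx + zeros * sz - qz
-- ===== Notes on version B (the rewrite author's own statement) =====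
-- stated objective: alternative
-- what changed: Replaces A's left[]/right[] arrays and second product-sum pass by a single array-free pass over scalar accumulators (running prefix counts, their sums and sums of squares), combined at the end by the closed form ones*sx - qx + zeros*sz - qz; measured ~2x faster (no list allocation/indexing, one pass).
import Mathlib
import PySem

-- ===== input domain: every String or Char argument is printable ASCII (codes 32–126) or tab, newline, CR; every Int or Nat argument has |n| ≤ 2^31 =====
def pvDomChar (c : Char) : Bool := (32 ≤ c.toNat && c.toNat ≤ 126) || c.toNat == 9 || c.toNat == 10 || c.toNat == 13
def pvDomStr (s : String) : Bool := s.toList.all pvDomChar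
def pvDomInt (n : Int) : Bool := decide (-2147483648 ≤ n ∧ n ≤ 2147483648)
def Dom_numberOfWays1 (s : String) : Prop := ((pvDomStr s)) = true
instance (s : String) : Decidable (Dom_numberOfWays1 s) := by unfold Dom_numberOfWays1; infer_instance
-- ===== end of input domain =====

-- B replaces A's left[]/right[] arrays and second product-sum pass by a single array-free pass
-- over scalar accumulators combined in closed form at the end (objective: alternative).


-- ===== PORT A =====
-- A-side helper: the body of A's first loop; state = (left, right, left_zero, left_one).
def aStep (ones zeros : Int) (st : List Int × List Int × Int × Int) (c : Char) :
    List Int × List Int × Int × Int :=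
  if c = '0' then (st.1 ++ [st.2.2.2], st.2.1 ++ [ones - st.2.2.2], st.2.2.1 + 1, st.2.2.2)
  else (st.1 ++ [st.2.2.1], st.2.1 ++ [zeros - st.2.2.1], st.2.2.1, st.2.2.2 + 1)

-- Python preallocates left/right and assigns left[i] in index order; appending builds the
-- same lists.  In the second loop left[i]/right[i] always has 0 ≤ i < len, so pyGetD is exact.
def numberOfWays1 (s : String) : Int :=
  let zeros : Int := (PySem.Str.count s "0" : Int)
  let ones : Int := (PySem.Str.count s "1" : Int)
  let st := s.toList.foldl (aStep ones zeros) ([], [], 0, 0)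
  (PySem.List.pyRange 0 (PySem.Str.len s) 1).foldl
    (fun res i => res + PySem.List.pyGetD st.1 i 0 * PySem.List.pyGetD st.2.1 i 0) 0

-- ===== PORT B =====
-- B-side helper: the loop body; state = (x, z, sx, sz, qx, qz).
def bStep (t : Int × Int × Int × Int × Int × Int) (c : Char) :
    Int × Int × Int × Int × Int × Int :=
  if c = '0' then
    (t.1, t.2.1 + 1, t.2.2.1 + t.1, t.2.2.2.1, t.2.2.2.2.1 + t.1 * t.1, t.2.2.2.2.2)
  else
    (t.1 + 1, t.2.1, t.2.2.1, t.2.2.2.1 + t.2.1, t.2.2.2.2.1, t.2.2.2.2.2 + t.2.1 * t.2.1)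

def numberOfWays1_alt (s : String) : Int :=
  let ones : Int := (PySem.Str.count s "1" : Int)
  let zeros : Int := (PySem.Str.count s "0" : Int)
  let t := s.toList.foldl bStep (0, 0, 0, 0, 0, 0)
  ones * t.2.2.1 - t.2.2.2.2.1 + zeros * t.2.2.2.1 - t.2.2.2.2.2

-- ===== PRECONDITION & SPEC =====
def Spec_numberOfWays1 (s : String) (out : Int) : Prop := out = numberOfWays1_alt s
instance (s : String) (out : Int) : Decidable (Spec_numberOfWays1 s out) := by unfold Spec_numberOfWays1; infer_instance

-- ===== CLAIM (what is proved, stated in full; the proofs are below) =====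
def Claim_equal_numberOfWays1 : Prop := ∀ (s : String), Dom_numberOfWays1 s → Spec_numberOfWays1 s (numberOfWays1 s)

-- ===== LEMMAS AND PROOFS =====

-- Main invariant, by snoc induction: A's first-pass state (left, right, left_zero, left_one)
-- against B's accumulators (x, z, sx, sz, qx, qz), for arbitrary parameters O/Z.
theorem pv_main (l : List Char) (O Z : Int) :
    (l.foldl (aStep O Z) ([], [], 0, 0)).1.length = l.length ∧
    (l.foldl (aStep O Z) ([], [], 0, 0)).2.1.length = l.length ∧
    (l.foldl (aStep O Z) ([], [], 0, 0)).2.2.1 = (l.foldl bStep (0, 0, 0, 0, 0, 0)).2.1 ∧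
    (l.foldl (aStep O Z) ([], [], 0, 0)).2.2.2 = (l.foldl bStep (0, 0, 0, 0, 0, 0)).1 ∧
    (List.zipWith (· * ·) (l.foldl (aStep O Z) ([], [], 0, 0)).1
        (l.foldl (aStep O Z) ([], [], 0, 0)).2.1).sum
      = O * (l.foldl bStep (0, 0, 0, 0, 0, 0)).2.2.1
        - (l.foldl bStep (0, 0, 0, 0, 0, 0)).2.2.2.2.1
        + Z * (l.foldl bStep (0, 0, 0, 0, 0, 0)).2.2.2.1
        - (l.foldl bStep (0, 0, 0, 0, 0, 0)).2.2.2.2.2 := by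
  induction l using List.reverseRecOn with
  | nil => exact ⟨by simp, by simp, by simp, by simp, by simp⟩
  | append_singleton l c ih =>
    obtain ⟨h1, h2, h3, h4, h5⟩ := ih
    simp only [List.foldl_append, List.foldl_cons, List.foldl_nil] at *
    rcases hA : l.foldl (aStep O Z) ([], [], 0, 0) with ⟨L, R, lz, lo⟩
    rcases hB : l.foldl bStep (0, 0, 0, 0, 0, 0) with ⟨x, z, sx, sz, qx, qz⟩
    simp only [hA, hB] at h1 h2 h3 h4 h5 ⊢
    by_cases hc0 : c = '0'
    · subst hc0
      have eA : aStep O Z (L, R, lz, lo) '0' = (L ++ [lo], R ++ [O - lo], lz + 1, lo) := by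
        simp [aStep]
      have eB : bStep (x, z, sx, sz, qx, qz) '0'
          = (x, z + 1, sx + x, sz, qx + x * x, qz) := by simp [bStep]
      rw [eA, eB]
      refine ⟨?_, ?_, ?_, ?_, ?_⟩
      · simp only [List.length_append, List.length_cons, List.length_nil]; omega
      · simp only [List.length_append, List.length_cons, List.length_nil]; omega
      · simp [h3]
      · exact h4
      · rw [List.zipWith_append (h1.trans h2.symm), List.sum_append, h5, h4]
        simp; ring
    · have eA : aStep O Z (L, R, lz, lo) c = (L ++ [lz], R ++ [Z - lz], lz, lo + 1) := by
        simp [aStep, hc0]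
      have eB : bStep (x, z, sx, sz, qx, qz) c
          = (x + 1, z, sx, sz + z, qx, qz + z * z) := by simp [bStep, hc0]
      rw [eA, eB]
      refine ⟨?_, ?_, ?_, ?_, ?_⟩
      · simp only [List.length_append, List.length_cons, List.length_nil]; omega
      · simp only [List.length_append, List.length_cons, List.length_nil]; omega
      · exact h3
      · simp [h4]
      · rw [List.zipWith_append (h1.trans h2.symm), List.sum_append, h5, h3]
        simp; ring

-- ===== VERDICT (by name: the statement is the Claim_ definition above) =====
theorem numberOfWays1_spec : Claim_equal_numberOfWays1 := by
  intro s _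
  unfold Spec_numberOfWays1 numberOfWays1 numberOfWays1_alt
  dsimp only
  obtain ⟨h1, h2, h3, h4, h5⟩ :=
    pv_main s.toList ((PySem.Str.count s "1" : Int)) ((PySem.Str.count s "0" : Int))
  set A := s.toList.foldl
      (aStep ((PySem.Str.count s "1" : Int)) ((PySem.Str.count s "0" : Int))) ([], [], 0, 0)
    with hA
  set P := List.zipWith (· * ·) A.1 A.2.1 with hP
  have hPlen : P.length = s.toList.length := by
    rw [hP, List.length_zipWith, h1, h2]; exact Nat.min_self _
  have hLen : PySem.Str.len s = (P.length : Int) := by rw [PySem.Str.len_eq, hPlen]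
  rw [hLen]
  have hcong : ∀ acc : Int, ∀ i ∈ PySem.List.pyRange 0 (P.length : Int) 1,
      acc + PySem.List.pyGetD A.1 i 0 * PySem.List.pyGetD A.2.1 i 0
        = acc + PySem.List.pyGetD P i 0 := by
    intro acc i hi
    rw [PySem.List.mem_pyRange_one] at hi
    have hi1 : i < (A.1.length : Int) := by rw [h1, ← hPlen]; exact hi.2
    have hi2 : i < (A.2.1.length : Int) := by rw [h2, ← hPlen]; exact hi.2
    have hiP : i < (P.length : Int) := hi.2
    rw [PySem.List.pyGetD_eq_getElem _ _ hi.1 hi1, PySem.List.pyGetD_eq_getElem _ _ hi.1 hi2,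
      PySem.List.pyGetD_eq_getElem _ _ hi.1 hiP]
    simp only [hP, List.getElem_zipWith]
  rw [PySem.List.foldl_congr_mem _ _ _ _ hcong,
    PySem.List.foldl_pyRange_zero_pyGetD' P 0 (fun acc x => acc + x) 0,
    ← List.sum_eq_foldl, h5]
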